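-- pv_equiv track=rewrite | github.com/ianlayzer/adventofcode2022 | code/08.py | getVisibilityGrid
-- ===== SOURCE A (Python) =====
-- def getVisibilityGrid(grid):
--     numRows = len(grid)
--     numCols = len(grid[0])
--     visible = [[False for t in row] for row in grid]
--     for r in range(numRows):
--         # left to right
--         currMax = -1
--         for c in range(numCols):
--             if grid[r][c] > currMax:
--                 visible[r][c] = True
--                 currMax = grid[r][c]
--         # right to left
--         currMax = -1
--         for c in range(numCols - 1, -1, -1):
--             if grid[r][c] > currMax:
--                 visible[r][c] = True
--                 currMax = grid[r][c]
--
--     for c in range(numCols):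
--         # top to bottom
--         currMax = -1
--         for r in range(numRows):
--             if grid[r][c] > currMax:
--                 visible[r][c] = True
--                 currMax = grid[r][c]
--         # bottom to top
--         currMax = -1
--         for r in range(numRows - 1, -1, -1):
--             if grid[r][c] > currMax:
--                 visible[r][c] = True
--                 currMax = grid[r][c]
--     return visible
-- ===== SOURCE B (Python) =====
-- def getVisibilityGrid(grid):
--     def prefixMaxes(xs):
--         # maxes[i] = running maximum of xs[:i]; -1 seeds the empty prefix
--         maxes, m = [], -1
--         for x in xs:
--             maxes.append(m)
--             m = max(m, x)
--         return maxes
--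
--     cols = list(zip(*grid))
--     left = [prefixMaxes(row) for row in grid]
--     right = [prefixMaxes(row[::-1])[::-1] for row in grid]
--     top = [prefixMaxes(col) for col in cols]
--     bottom = [prefixMaxes(col[::-1])[::-1] for col in cols]
--     # a tree is visible iff it is taller than its lowest directional blocker
--     return [[grid[r][c] > min(left[r][c], right[r][c], top[c][r], bottom[c][r])
--              for c in range(len(grid[r]))]
--             for r in range(len(grid))]
-- ===== Notes on version B (the rewrite author's own statement) =====
-- stated objective: alternative
-- what changed: Replaces A's four marking sweeps that mutate a shared boolean grid with a pure table-based solution: precompute the four directional prefix-maximum tables (left/right/top/bottom), then a cell is visible iff its height exceeds the minimum of its four directional blockers; Pre_ excludes the empty grid (A raises IndexError on grid[0]) and ragged grids (on a row shorter than row 0 A raises IndexError, on a longer one A's trailing False cells are an artefact of taking the width from row 0; B naturally raises on ragged grids).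
-- outside the precondition, e.g. on getVisibilityGrid([[1], [2, 3]]): A returns [[True], [True, False]], B raises IndexError
import Mathlib
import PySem

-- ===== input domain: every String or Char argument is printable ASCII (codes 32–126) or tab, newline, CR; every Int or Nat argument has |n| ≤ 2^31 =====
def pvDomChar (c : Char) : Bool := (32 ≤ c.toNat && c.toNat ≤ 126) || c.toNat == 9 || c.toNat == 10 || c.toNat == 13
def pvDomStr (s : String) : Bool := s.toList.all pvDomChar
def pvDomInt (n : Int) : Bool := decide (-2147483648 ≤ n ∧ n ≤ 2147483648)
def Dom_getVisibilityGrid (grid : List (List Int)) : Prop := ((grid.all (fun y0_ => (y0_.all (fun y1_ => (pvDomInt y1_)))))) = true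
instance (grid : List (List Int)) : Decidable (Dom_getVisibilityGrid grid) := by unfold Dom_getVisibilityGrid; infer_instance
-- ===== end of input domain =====

-- B replaces A's four in-place marking sweeps with four precomputed directional
-- prefix-maximum tables and a per-cell comparison against their minimum (alternative, not faster).

-- ===== PORT A =====
-- grid[r][c]; under Pre_ every access A makes is in range, so the default is never returned
def pvCell (grid : List (List Int)) (r c : Nat) : Int := (grid.getD r []).getD c 0

-- visible[r][c] = True
def pvSetTrue (vis : List (List Bool)) (r c : Nat) : List (List Bool) :=
  vis.set r ((vis.getD r []).set c true)

-- one of A's sweep loops: fold over the loop indices cs with state (visible, currMax);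
-- f maps the loop index to the cell it touches, g to that cell's height
def pvPass (g : Nat → Int) (f : Nat → Nat × Nat) (cs : List Nat)
    (st : List (List Bool) × Int) : List (List Bool) × Int :=
  cs.foldl (fun st i => if g i > st.2 then (pvSetTrue st.1 (f i).1 (f i).2, g i) else st) st

def getVisibilityGrid (grid : List (List Int)) : List (List Bool) :=
  let numRows := grid.length
  let numCols := (grid.getD 0 []).length
  let visible := grid.map (fun row => row.map (fun _ => false))
  let vis1 := (List.range numRows).foldl (fun vis r =>
      (pvPass (pvCell grid r) (fun c => (r, c)) ((List.range numCols).reverse)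
        ((pvPass (pvCell grid r) (fun c => (r, c)) (List.range numCols) (vis, -1)).1, -1)).1) visible
  (List.range numCols).foldl (fun vis c =>
      (pvPass (fun r => pvCell grid r c) (fun r => (r, c)) ((List.range numRows).reverse)
        ((pvPass (fun r => pvCell grid r c) (fun r => (r, c)) (List.range numRows) (vis, -1)).1, -1)).1) vis1

-- ===== PORT B =====
-- prefixMaxes of Source B: maxes[i] = running maximum of xs[:i]; -1 seeds the empty prefix
def pvPrefixMaxes (xs : List Int) : List Int :=
  (xs.foldl (fun st x => (st.1 ++ [st.2], max st.2 x)) (([] : List Int), (-1 : Int))).1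

-- list(zip(*grid)): column c exists iff c < every row's length, so the width is the minimal row length
def pvCols (grid : List (List Int)) : List (List Int) :=
  (List.range (((grid.map List.length).min?).getD 0)).map
    (fun c => grid.map (fun row => row.getD c 0))

def getVisibilityGrid_alt (grid : List (List Int)) : List (List Bool) :=
  let cols := pvCols grid
  let left := grid.map pvPrefixMaxes
  let right := grid.map (fun row => (pvPrefixMaxes row.reverse).reverse)
  let top := cols.map pvPrefixMaxes
  let bottom := cols.map (fun col => (pvPrefixMaxes col.reverse).reverse)
  (List.range grid.length).map (fun r =>
    (List.range (grid.getD r []).length).map (fun c =>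
      decide ((grid.getD r []).getD c 0 >
        min (min (min ((left.getD r []).getD c 0) ((right.getD r []).getD c 0))
                 ((top.getD c []).getD r 0))
            ((bottom.getD c []).getD r 0))))

-- ===== PRECONDITION & SPEC =====
-- Pre_ excludes the empty grid (A raises IndexError on grid[0]) and ragged grids: on a row
-- shorter than row 0 A raises IndexError, and on a longer one A's trailing False cells are an
-- artefact of taking the width from row 0; B naturally raises on ragged grids.
def Pre_getVisibilityGrid (grid : List (List Int)) : Prop :=
  grid ≠ [] ∧ ∀ row ∈ grid, row.length = (grid.getD 0 []).length
instance (grid : List (List Int)) : Decidable (Pre_getVisibilityGrid grid) := by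
  unfold Pre_getVisibilityGrid; infer_instance

def pvWitness_getVisibilityGrid : List (List Int) := [[1, 2], [3, 0]]

def Spec_getVisibilityGrid (grid : List (List Int)) (out : List (List Bool)) : Prop := out = getVisibilityGrid_alt grid
instance (grid : List (List Int)) (out : List (List Bool)) : Decidable (Spec_getVisibilityGrid grid out) := by unfold Spec_getVisibilityGrid; infer_instance

-- ===== CLAIM (what is proved, stated in full; the proofs are below) =====
def Claim_equal_getVisibilityGrid : Prop := ∀ (grid : List (List Int)), Dom_getVisibilityGrid grid → Pre_getVisibilityGrid grid → Spec_getVisibilityGrid grid (getVisibilityGrid grid)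

-- ===== LEMMAS AND PROOFS =====

-- cell (r, c) of the visibility structure
def pvGetV (v : List (List Bool)) (r c : Nat) : Bool := (v.getD r []).getD c false

-- the four directional visibility conditions, phrased as A computes them (running max with base -1)
abbrev pvCondL (grid : List (List Int)) (r c : Nat) : Prop :=
  pvCell grid r c > ((List.range c).map (pvCell grid r)).foldl max (-1)
abbrev pvCondR (grid : List (List Int)) (n r c : Nat) : Prop :=
  pvCell grid r c > ((List.range' (c + 1) (n - (c + 1))).map (pvCell grid r)).foldl max (-1)
abbrev pvCondT (grid : List (List Int)) (r c : Nat) : Prop :=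
  pvCell grid r c > ((List.range r).map (fun i => pvCell grid i c)).foldl max (-1)
abbrev pvCondB (grid : List (List Int)) (m r c : Nat) : Prop :=
  pvCell grid r c > ((List.range' (r + 1) (m - (r + 1))).map (fun i => pvCell grid i c)).foldl max (-1)

lemma pvSetTrue_length (v : List (List Bool)) (a b : Nat) : (pvSetTrue v a b).length = v.length := by
  simp [pvSetTrue]

lemma pvGetD_set {α : Type} (v : List α) (a r : Nat) (x d : α) :
    (v.set a x).getD r d = if a = r ∧ a < v.length then x else v.getD r d := by
  simp only [List.getD, List.getElem?_set]
  by_cases h1 : a = r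
  · subst h1
    by_cases h2 : a < v.length <;> simp [h2]
  · simp [h1]

lemma pvSetTrue_rowlen (v : List (List Bool)) (a b r : Nat) :
    ((pvSetTrue v a b).getD r []).length = (v.getD r []).length := by
  rw [pvSetTrue, pvGetD_set]
  split_ifs with h
  · rw [← h.1]; simp
  · rfl

lemma pvGetV_setTrue_self (v : List (List Bool)) (a b : Nat)
    (ha : a < v.length) (hb : b < (v.getD a []).length) :
    pvGetV (pvSetTrue v a b) a b = true := by
  rw [pvGetV, pvSetTrue, pvGetD_set]
  simp only [ha, and_true, if_true]
  rw [pvGetD_set, if_pos ⟨rfl, hb⟩]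

lemma pvGetV_setTrue_ne (v : List (List Bool)) (a b a' b' : Nat) (h : ¬ (a = a' ∧ b = b')) :
    pvGetV (pvSetTrue v a b) a' b' = pvGetV v a' b' := by
  rw [pvGetV, pvSetTrue, pvGetD_set, pvGetV]
  split_ifs with h1
  · obtain ⟨rfl, _⟩ := h1
    rw [pvGetD_set]
    split_ifs with h2
    · exact absurd ⟨rfl, h2.1⟩ h
    · rfl
  · rfl

lemma foldl_max_comm (l : List Int) (a b : Int) :
    l.foldl max (max a b) = max (l.foldl max a) b := by
  induction l generalizing a with
  | nil => rfl
  | cons x xs ih => simpa [max_right_comm a b x] using ih (max a x)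

lemma pvPass_cons (g : Nat → Int) (f : Nat → Nat × Nat) (c : Nat) (cs : List Nat)
    (st : List (List Bool) × Int) :
    pvPass g f (c :: cs) st
      = pvPass g f cs (if g c > st.2 then (pvSetTrue st.1 (f c).1 (f c).2, g c) else st) := rfl

lemma pvPass_snd (g : Nat → Int) (f : Nat → Nat × Nat) (cs : List Nat)
    (v : List (List Bool)) (m : Int) :
    (pvPass g f cs (v, m)).2 = (cs.map g).foldl max m := by
  induction cs generalizing v m with
  | nil => rfl
  | cons c cs ih =>
    rw [pvPass_cons]
    by_cases h : g c > m
    · simp only [h, if_true]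
      rw [ih]
      simp [max_eq_right (le_of_lt h)]
    · simp only [h, if_false]
      rw [ih]
      simp [max_eq_left (le_of_not_gt h)]

lemma pvPass_length (g : Nat → Int) (f : Nat → Nat × Nat) (cs : List Nat)
    (st : List (List Bool) × Int) : (pvPass g f cs st).1.length = st.1.length := by
  induction cs generalizing st with
  | nil => rfl
  | cons c cs ih =>
    rw [pvPass_cons]
    by_cases h : g c > st.2 <;> simp [h, ih, pvSetTrue_length]

lemma pvPass_rowlen (g : Nat → Int) (f : Nat → Nat × Nat) (cs : List Nat)
    (st : List (List Bool) × Int) (r : Nat) :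
    ((pvPass g f cs st).1.getD r []).length = (st.1.getD r []).length := by
  induction cs generalizing st with
  | nil => rfl
  | cons c cs ih =>
    rw [pvPass_cons]
    by_cases h : g c > st.2
    · simp only [h, if_true]
      rw [ih (pvSetTrue st.1 (f c).1 (f c).2, g c)]
      exact pvSetTrue_rowlen _ _ _ _
    · simp only [h, if_false]
      exact ih st

lemma pvPass_nil (g : Nat → Int) (f : Nat → Nat × Nat) (st : List (List Bool) × Int) :
    pvPass g f [] st = st := rfl

lemma pvPass_append (g : Nat → Int) (f : Nat → Nat × Nat) (cs1 cs2 : List Nat)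
    (st : List (List Bool) × Int) :
    pvPass g f (cs1 ++ cs2) st = pvPass g f cs2 (pvPass g f cs1 st) := by
  simp [pvPass, List.foldl_append]

-- forward sweep, pointwise
lemma pvPass_range_getV (g : Nat → Int) (f : Nat → Nat × Nat) (n : Nat)
    (v : List (List Bool)) (m : Int)
    (hb : ∀ i, i < n → (f i).1 < v.length ∧ (f i).2 < (v.getD (f i).1 []).length)
    (a b : Nat) :
    pvGetV (pvPass g f (List.range n) (v, m)).1 a b
      = (pvGetV v a b ||
         decide (∃ j, j < n ∧ f j = (a, b) ∧ g j > ((List.range j).map g).foldl max m)) := by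
  induction n with
  | zero => simp [pvPass_nil]
  | succ n ih =>
    rw [List.range_succ, pvPass_append]
    have hsnd : (pvPass g f (List.range n) (v, m)).2 = ((List.range n).map g).foldl max m :=
      pvPass_snd g f _ v m
    have hlen : (pvPass g f (List.range n) (v, m)).1.length = v.length := pvPass_length g f _ _
    have hrl : ∀ r, ((pvPass g f (List.range n) (v, m)).1.getD r []).length = (v.getD r []).length :=
      fun r => pvPass_rowlen g f _ _ r
    have ihg := ih (fun i hi => hb i (Nat.lt_succ_of_lt hi))
    have hsplit : (∃ j, j < n + 1 ∧ f j = (a, b) ∧ g j > ((List.range j).map g).foldl max m)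
        ↔ ((∃ j, j < n ∧ f j = (a, b) ∧ g j > ((List.range j).map g).foldl max m) ∨
           (f n = (a, b) ∧ g n > ((List.range n).map g).foldl max m)) := by
      constructor
      · rintro ⟨j, hj, h2⟩
        rcases Nat.lt_succ_iff_lt_or_eq.mp hj with hj | rfl
        · exact Or.inl ⟨j, hj, h2⟩
        · exact Or.inr h2
      · rintro (⟨j, hj, h2⟩ | h2)
        · exact ⟨j, Nat.lt_succ_of_lt hj, h2⟩
        · exact ⟨n, Nat.lt_succ_self n, h2⟩
    rw [decide_eq_decide.mpr hsplit, Bool.decide_or, ← Bool.or_assoc, ← ihg]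
    rw [pvPass_cons, pvPass_nil]
    by_cases hfn : f n = (a, b)
    · have hfa : (f n).1 = a := by rw [hfn]
      have hfb : (f n).2 = b := by rw [hfn]
      by_cases hgn : g n > (pvPass g f (List.range n) (v, m)).2
      · simp only [hgn, if_true]
        have hb' := hb n (Nat.lt_succ_self n)
        rw [hfa, hfb] at hb' ⊢
        rw [pvGetV_setTrue_self _ _ _ (by rw [hlen]; exact hb'.1)
              (by rw [hrl]; exact hb'.2)]
        rw [hsnd] at hgn
        simp [hfn, hgn]
      · simp only [hgn, if_false]
        rw [hsnd] at hgn
        rw [decide_eq_false (fun h => hgn h.2), Bool.or_false]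
    · have hne : ¬((f n).1 = a ∧ (f n).2 = b) := by
        rintro ⟨h1, h2⟩; exact hfn (Prod.ext h1 h2)
      rw [decide_eq_false (fun h => hfn h.1), Bool.or_false]
      by_cases hgn : g n > (pvPass g f (List.range n) (v, m)).2
      · simp only [hgn, if_true]
        exact pvGetV_setTrue_ne _ _ _ _ _ hne
      · simp only [hgn, if_false]

-- backward sweep, pointwise
lemma pvPass_rev_getV (g : Nat → Int) (f : Nat → Nat × Nat) (n : Nat)
    (v : List (List Bool)) (m : Int)
    (hb : ∀ i, i < n → (f i).1 < v.length ∧ (f i).2 < (v.getD (f i).1 []).length)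
    (a b : Nat) :
    pvGetV (pvPass g f ((List.range n).reverse) (v, m)).1 a b
      = (pvGetV v a b ||
         decide (∃ j, j < n ∧ f j = (a, b) ∧
                   g j > ((List.range' (j + 1) (n - (j + 1))).map g).foldl max m)) := by
  induction n generalizing v m with
  | zero => simp [pvPass_nil]
  | succ n ih =>
    have hrev : (List.range (n + 1)).reverse = n :: (List.range n).reverse := by
      simp [List.range_succ]
    rw [hrev, pvPass_cons]
    have hfold : ∀ j, j < n →
        ((List.range' (j + 1) (n + 1 - (j + 1))).map g).foldl max m
          = max (((List.range' (j + 1) (n - (j + 1))).map g).foldl max m) (g n) := by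
      intro j hj
      have h1 : n + 1 - (j + 1) = (n - (j + 1)) + 1 := by omega
      have h2 : j + 1 + 1 * (n - (j + 1)) = n := by omega
      rw [h1, List.range'_concat, h2, List.map_append, List.foldl_append]
      simp
    have hsplit : (∃ j, j < n + 1 ∧ f j = (a, b) ∧
          g j > ((List.range' (j + 1) (n + 1 - (j + 1))).map g).foldl max m)
        ↔ ((∃ j, j < n ∧ f j = (a, b) ∧
             g j > ((List.range' (j + 1) (n - (j + 1))).map g).foldl max (max m (g n))) ∨
           (f n = (a, b) ∧ g n > m)) := by
      constructor
      · rintro ⟨j, hj, h2, h3⟩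
        rcases Nat.lt_succ_iff_lt_or_eq.mp hj with hj | rfl
        · rw [hfold j hj] at h3
          exact Or.inl ⟨j, hj, h2, by rw [foldl_max_comm]; exact h3⟩
        · simp at h3
          exact Or.inr ⟨h2, h3⟩
      · rintro (⟨j, hj, h2, h3⟩ | ⟨h2, h3⟩)
        · rw [foldl_max_comm] at h3
          rw [← hfold j hj] at h3
          exact ⟨j, Nat.lt_succ_of_lt hj, h2, h3⟩
        · refine ⟨n, Nat.lt_succ_self n, h2, ?_⟩
          simpa using h3
    rw [decide_eq_decide.mpr hsplit, Bool.decide_or, Bool.or_comm (decide _) (decide _),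
      ← Bool.or_assoc]
    by_cases hgn : g n > m
    · simp only [hgn, if_true]
      have hb0 := hb n (Nat.lt_succ_self n)
      have hmax : g n = max m (g n) := (max_eq_right (le_of_lt hgn)).symm
      have hb' : ∀ i, i < n →
          (f i).1 < (pvSetTrue v (f n).1 (f n).2).length ∧
          (f i).2 < ((pvSetTrue v (f n).1 (f n).2).getD (f i).1 []).length := by
        intro i hi
        rw [pvSetTrue_length, pvSetTrue_rowlen]
        exact hb i (Nat.lt_succ_of_lt hi)
      rw [show (pvSetTrue v (f n).1 (f n).2, g n)
            = (pvSetTrue v (f n).1 (f n).2, max m (g n)) by rw [← hmax]]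
      rw [ih _ _ hb']
      by_cases hfn : f n = (a, b)
      · have hfa : (f n).1 = a := by rw [hfn]
        have hfb : (f n).2 = b := by rw [hfn]
        rw [hfa, hfb] at hb0 ⊢
        rw [pvGetV_setTrue_self _ _ _ hb0.1 hb0.2]
        simp [hfn]
      · have hne : ¬((f n).1 = a ∧ (f n).2 = b) := by
          rintro ⟨h1, h2⟩; exact hfn (Prod.ext h1 h2)
        rw [pvGetV_setTrue_ne _ _ _ _ _ hne]
        simp [hfn]
    · simp only [hgn, if_false]
      have hmax : m = max m (g n) := (max_eq_left (le_of_not_gt hgn)).symm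
      rw [show ((v, m) : List (List Bool) × Int) = (v, max m (g n)) by rw [← hmax]]
      rw [ih _ _ (fun i hi => hb i (Nat.lt_succ_of_lt hi))]
      simp

-- the two sweeps A performs on row r / column c, as they appear in getVisibilityGrid
def pvRowStep (grid : List (List Int)) (vis : List (List Bool)) (r : Nat) : List (List Bool) :=
  (pvPass (pvCell grid r) (fun c => (r, c)) ((List.range (grid.getD 0 []).length).reverse)
    ((pvPass (pvCell grid r) (fun c => (r, c)) (List.range (grid.getD 0 []).length) (vis, -1)).1, -1)).1

def pvColStep (grid : List (List Int)) (vis : List (List Bool)) (c : Nat) : List (List Bool) :=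
  (pvPass (fun r => pvCell grid r c) (fun r => (r, c)) ((List.range grid.length).reverse)
    ((pvPass (fun r => pvCell grid r c) (fun r => (r, c)) (List.range grid.length) (vis, -1)).1, -1)).1

lemma getVisibilityGrid_eq (grid : List (List Int)) :
    getVisibilityGrid grid
      = (List.range (grid.getD 0 []).length).foldl (pvColStep grid)
          ((List.range grid.length).foldl (pvRowStep grid)
            (grid.map (fun row => row.map (fun _ => false)))) := rfl

lemma pvRowStep_length (grid : List (List Int)) (v : List (List Bool)) (r : Nat) :
    (pvRowStep grid v r).length = v.length := by
  simp [pvRowStep, pvPass_length]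

lemma pvRowStep_rowlen (grid : List (List Int)) (v : List (List Bool)) (r s : Nat) :
    ((pvRowStep grid v r).getD s []).length = (v.getD s []).length := by
  rw [pvRowStep, pvPass_rowlen, pvPass_rowlen]

lemma pvColStep_length (grid : List (List Int)) (v : List (List Bool)) (c : Nat) :
    (pvColStep grid v c).length = v.length := by
  simp [pvColStep, pvPass_length]

lemma pvColStep_rowlen (grid : List (List Int)) (v : List (List Bool)) (c s : Nat) :
    ((pvColStep grid v c).getD s []).length = (v.getD s []).length := by
  rw [pvColStep, pvPass_rowlen, pvPass_rowlen]

lemma foldl_step_length (step : List (List Bool) → Nat → List (List Bool))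
    (h1 : ∀ v i, (step v i).length = v.length) (cs : List Nat) (v : List (List Bool)) :
    (cs.foldl step v).length = v.length := by
  induction cs generalizing v with
  | nil => rfl
  | cons c cs ih => rw [List.foldl_cons, ih, h1]

lemma foldl_step_rowlen (step : List (List Bool) → Nat → List (List Bool))
    (h2 : ∀ v i s, ((step v i).getD s []).length = (v.getD s []).length)
    (cs : List Nat) (v : List (List Bool)) (s : Nat) :
    ((cs.foldl step v).getD s []).length = (v.getD s []).length := by
  induction cs generalizing v with
  | nil => rfl
  | cons c cs ih => rw [List.foldl_cons, ih, h2]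

lemma pvRow_mem (grid : List (List Int)) (r : Nat) (hr : r < grid.length) :
    grid.getD r [] ∈ grid := by
  rw [List.getD_eq_getElem grid [] hr]
  exact List.getElem_mem hr

-- effect of A's two sweeps over row r, pointwise
lemma pvRowStep_getV (grid : List (List Int)) (v : List (List Bool)) (r a b : Nat)
    (hlen : v.length = grid.length)
    (hrl : ∀ s, (v.getD s []).length = (grid.getD s []).length)
    (hpre : ∀ row ∈ grid, row.length = (grid.getD 0 []).length)
    (hr : r < grid.length) :
    pvGetV (pvRowStep grid v r) a b
      = (pvGetV v a b ||
         decide (a = r ∧ b < (grid.getD 0 []).length ∧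
                 (pvCondL grid r b ∨ pvCondR grid (grid.getD 0 []).length r b))) := by
  have hrow : (grid.getD r []).length = (grid.getD 0 []).length :=
    hpre _ (pvRow_mem grid r hr)
  have hb1 : ∀ i, i < (grid.getD 0 []).length →
      ((fun c => (r, c)) i).1 < v.length ∧
      ((fun c => (r, c)) i).2 < (v.getD ((fun c => (r, c)) i).1 []).length := by
    intro i hi
    refine ⟨by rw [hlen]; exact hr, ?_⟩
    rw [hrl r, hrow]; exact hi
  have hmid := pvPass_range_getV (pvCell grid r) (fun c => (r, c))
    ((grid.getD 0 []).length) v (-1) hb1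
  have hb2 : ∀ i, i < (grid.getD 0 []).length →
      ((fun c => (r, c)) i).1
          < (pvPass (pvCell grid r) (fun c => (r, c)) (List.range (grid.getD 0 []).length) (v, -1)).1.length ∧
      ((fun c => (r, c)) i).2
          < ((pvPass (pvCell grid r) (fun c => (r, c)) (List.range (grid.getD 0 []).length) (v, -1)).1.getD
              ((fun c => (r, c)) i).1 []).length := by
    intro i hi
    rw [pvPass_length, pvPass_rowlen]
    exact hb1 i hi
  rw [pvRowStep, pvPass_rev_getV _ _ _ _ _ hb2 a b, hmid a b, Bool.or_assoc]
  congr 1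
  rw [← Bool.decide_or, decide_eq_decide]
  constructor
  · rintro (⟨j, hj, hfj, hgt⟩ | ⟨j, hj, hfj, hgt⟩) <;>
      obtain ⟨rfl, rfl⟩ := Prod.mk.injEq .. ▸ hfj
    · exact ⟨rfl, hj, Or.inl hgt⟩
    · exact ⟨rfl, hj, Or.inr hgt⟩
  · rintro ⟨rfl, hb', hL | hR⟩
    · exact Or.inl ⟨b, hb', rfl, hL⟩
    · exact Or.inr ⟨b, hb', rfl, hR⟩

-- effect of A's two sweeps over column c, pointwise
lemma pvColStep_getV (grid : List (List Int)) (v : List (List Bool)) (c a b : Nat)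
    (hlen : v.length = grid.length)
    (hrl : ∀ s, (v.getD s []).length = (grid.getD s []).length)
    (hpre : ∀ row ∈ grid, row.length = (grid.getD 0 []).length)
    (hc : c < (grid.getD 0 []).length) :
    pvGetV (pvColStep grid v c) a b
      = (pvGetV v a b ||
         decide (b = c ∧ a < grid.length ∧
                 (pvCondT grid a c ∨ pvCondB grid grid.length a c))) := by
  have hb1 : ∀ i, i < grid.length →
      ((fun r => (r, c)) i).1 < v.length ∧
      ((fun r => (r, c)) i).2 < (v.getD ((fun r => (r, c)) i).1 []).length := by
    intro i hi
    refine ⟨by rw [hlen]; exact hi, ?_⟩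
    rw [hrl i, hpre _ (pvRow_mem grid i hi)]; exact hc
  have hmid := pvPass_range_getV (fun r => pvCell grid r c) (fun r => (r, c))
    grid.length v (-1) hb1
  have hb2 : ∀ i, i < grid.length →
      ((fun r => (r, c)) i).1
          < (pvPass (fun r => pvCell grid r c) (fun r => (r, c)) (List.range grid.length) (v, -1)).1.length ∧
      ((fun r => (r, c)) i).2
          < ((pvPass (fun r => pvCell grid r c) (fun r => (r, c)) (List.range grid.length) (v, -1)).1.getD
              ((fun r => (r, c)) i).1 []).length := by
    intro i hi
    rw [pvPass_length, pvPass_rowlen]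
    exact hb1 i hi
  rw [pvColStep, pvPass_rev_getV _ _ _ _ _ hb2 a b, hmid a b, Bool.or_assoc]
  congr 1
  rw [← Bool.decide_or, decide_eq_decide]
  constructor
  · rintro (⟨j, hj, hfj, hgt⟩ | ⟨j, hj, hfj, hgt⟩) <;>
      obtain ⟨rfl, rfl⟩ := Prod.mk.injEq .. ▸ hfj
    · exact ⟨rfl, hj, Or.inl hgt⟩
    · exact ⟨rfl, hj, Or.inr hgt⟩
  · rintro ⟨rfl, ha', hT | hB⟩
    · exact Or.inl ⟨a, ha', rfl, hT⟩
    · exact Or.inr ⟨a, ha', rfl, hB⟩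

-- the row phase of A (both sweeps of each of the first n rows), pointwise
lemma pvRowPhase_getV (grid : List (List Int))
    (hpre : ∀ row ∈ grid, row.length = (grid.getD 0 []).length) (n : Nat)
    (hn : n ≤ grid.length) (v : List (List Bool))
    (hlen : v.length = grid.length)
    (hrl : ∀ s, (v.getD s []).length = (grid.getD s []).length) (a b : Nat) :
    pvGetV ((List.range n).foldl (pvRowStep grid) v) a b
      = (pvGetV v a b ||
         decide (a < n ∧ b < (grid.getD 0 []).length ∧
                 (pvCondL grid a b ∨ pvCondR grid (grid.getD 0 []).length a b))) := by
  induction n with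
  | zero => simp
  | succ n ih =>
    rw [List.range_succ, List.foldl_append, List.foldl_cons, List.foldl_nil]
    have hflen : ((List.range n).foldl (pvRowStep grid) v).length = grid.length := by
      rw [foldl_step_length _ (pvRowStep_length grid), hlen]
    have hfrl : ∀ s, (((List.range n).foldl (pvRowStep grid) v).getD s []).length
        = (grid.getD s []).length := by
      intro s; rw [foldl_step_rowlen _ (pvRowStep_rowlen grid), hrl]
    rw [pvRowStep_getV grid _ n a b hflen hfrl hpre (Nat.lt_of_succ_le hn),
      ih (Nat.le_of_succ_le hn), Bool.or_assoc]
    congr 1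
    rw [← Bool.decide_or, decide_eq_decide]
    constructor
    · rintro (⟨h1, h2, h3⟩ | ⟨rfl, h2, h3⟩)
      · exact ⟨Nat.lt_succ_of_lt h1, h2, h3⟩
      · exact ⟨Nat.lt_succ_self a, h2, h3⟩
    · rintro ⟨h1, h2, h3⟩
      rcases Nat.lt_succ_iff_lt_or_eq.mp h1 with h1 | rfl
      · exact Or.inl ⟨h1, h2, h3⟩
      · exact Or.inr ⟨rfl, h2, h3⟩

-- the column phase of A (both sweeps of each of the first n columns), pointwise
lemma pvColPhase_getV (grid : List (List Int))
    (hpre : ∀ row ∈ grid, row.length = (grid.getD 0 []).length) (n : Nat)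
    (hn : n ≤ (grid.getD 0 []).length) (v : List (List Bool))
    (hlen : v.length = grid.length)
    (hrl : ∀ s, (v.getD s []).length = (grid.getD s []).length) (a b : Nat) :
    pvGetV ((List.range n).foldl (pvColStep grid) v) a b
      = (pvGetV v a b ||
         decide (b < n ∧ a < grid.length ∧
                 (pvCondT grid a b ∨ pvCondB grid grid.length a b))) := by
  induction n with
  | zero => simp
  | succ n ih =>
    rw [List.range_succ, List.foldl_append, List.foldl_cons, List.foldl_nil]
    have hflen : ((List.range n).foldl (pvColStep grid) v).length = grid.length := by
      rw [foldl_step_length _ (pvColStep_length grid), hlen]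
    have hfrl : ∀ s, (((List.range n).foldl (pvColStep grid) v).getD s []).length
        = (grid.getD s []).length := by
      intro s; rw [foldl_step_rowlen _ (pvColStep_rowlen grid), hrl]
    rw [pvColStep_getV grid _ n a b hflen hfrl hpre (Nat.lt_of_succ_le hn),
      ih (Nat.le_of_succ_le hn), Bool.or_assoc]
    congr 1
    rw [← Bool.decide_or, decide_eq_decide]
    constructor
    · rintro (⟨h1, h2, h3⟩ | ⟨rfl, h2, h3⟩)
      · exact ⟨Nat.lt_succ_of_lt h1, h2, h3⟩
      · exact ⟨Nat.lt_succ_self b, h2, h3⟩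
    · rintro ⟨h1, h2, h3⟩
      rcases Nat.lt_succ_iff_lt_or_eq.mp h1 with h1 | rfl
      · exact Or.inl ⟨h1, h2, h3⟩
      · exact Or.inr ⟨rfl, h2, h3⟩

lemma pvGetV_init (grid : List (List Int)) (a b : Nat) :
    pvGetV (grid.map (fun row => row.map (fun _ => false))) a b = false := by
  have h1 : (grid.map (fun row => row.map (fun _ => false))).getD a []
      = (grid.getD a []).map (fun _ => false) := by
    by_cases ha : a < grid.length
    · rw [List.getD_eq_getElem _ _ (show a < (grid.map (fun row => row.map (fun _ => false))).length
          by simpa using ha), List.getD_eq_getElem _ _ ha, List.getElem_map]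
    · rw [List.getD_eq_default _ _ (by simpa using Nat.le_of_not_lt ha),
        List.getD_eq_default _ _ (Nat.le_of_not_lt ha)]
      rfl
  rw [pvGetV, h1]
  by_cases hbb : b < ((grid.getD a []).map (fun _ => false)).length
  · rw [List.getD_eq_getElem _ _ hbb, List.getElem_map]
  · rw [List.getD_eq_default _ _ (Nat.le_of_not_lt hbb)]

lemma getA_length (grid : List (List Int)) :
    (getVisibilityGrid grid).length = grid.length := by
  rw [getVisibilityGrid_eq, foldl_step_length _ (pvColStep_length grid),
    foldl_step_length _ (pvRowStep_length grid), List.length_map]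

lemma getA_rowlen (grid : List (List Int)) (s : Nat) :
    ((getVisibilityGrid grid).getD s []).length = (grid.getD s []).length := by
  rw [getVisibilityGrid_eq, foldl_step_rowlen _ (pvColStep_rowlen grid),
    foldl_step_rowlen _ (pvRowStep_rowlen grid)]
  by_cases hs : s < grid.length
  · rw [List.getD_eq_getElem _ _ (by simpa using hs), List.getD_eq_getElem _ _ hs]
    simp
  · rw [List.getD_eq_default _ _ (by simpa using Nat.le_of_not_lt hs),
      List.getD_eq_default _ _ (Nat.le_of_not_lt hs)]
    rfl

-- A's final grid, pointwise: visible from the left or right, or from the top or bottom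
lemma getA_getV (grid : List (List Int))
    (hpre : ∀ row ∈ grid, row.length = (grid.getD 0 []).length) (a b : Nat) :
    pvGetV (getVisibilityGrid grid) a b
      = (decide (a < grid.length ∧ b < (grid.getD 0 []).length ∧
                 (pvCondL grid a b ∨ pvCondR grid (grid.getD 0 []).length a b)) ||
         decide (b < (grid.getD 0 []).length ∧ a < grid.length ∧
                 (pvCondT grid a b ∨ pvCondB grid grid.length a b))) := by
  have hilen : (grid.map (fun row => row.map (fun _ => false))).length = grid.length := by simp
  have hirl : ∀ s, ((grid.map (fun row => row.map (fun _ => false))).getD s []).length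
      = (grid.getD s []).length := by
    intro s
    by_cases hs : s < grid.length
    · rw [List.getD_eq_getElem _ _ (by simpa using hs), List.getD_eq_getElem _ _ hs]; simp
    · rw [List.getD_eq_default _ _ (by simpa using Nat.le_of_not_lt hs),
        List.getD_eq_default _ _ (Nat.le_of_not_lt hs)]
      rfl
  rw [getVisibilityGrid_eq,
    pvColPhase_getV grid hpre _ (le_refl _) _
      (by rw [foldl_step_length _ (pvRowStep_length grid), hilen])
      (fun s => by rw [foldl_step_rowlen _ (pvRowStep_rowlen grid), hirl s]),
    pvRowPhase_getV grid hpre _ (le_refl _) _ hilen hirl,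
    pvGetV_init, Bool.false_or]

lemma map_getD_range_eq_take (l : List Int) (b : Nat) (h : b ≤ l.length) :
    (List.range b).map (fun i => l.getD i 0) = l.take b := by
  apply List.ext_getElem (by simp [h])
  intro i h1 h2
  simp only [List.getElem_map, List.getElem_range, List.getElem_take]
  have h1' : i < b := by simpa using h1
  exact List.getD_eq_getElem l 0 (by omega)

lemma range_drop (n m : Nat) : (List.range n).drop m = List.range' m (n - m) := by
  apply List.ext_getElem (by simp)
  intro i h1 h2
  simp [Nat.add_comm m i]

lemma map_getD_range'_eq_drop (l : List Int) (s : Nat) :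
    (List.range' s (l.length - s)).map (fun i => l.getD i 0) = l.drop s := by
  apply List.ext_getElem (by simp)
  intro i h1 h2
  simp only [List.getElem_map, List.getElem_range'_1, List.getElem_drop]
  have h1' : i < l.length - s := by simpa using h1
  exact List.getD_eq_getElem l 0 (show s + i < l.length by omega)

-- ----- B-side lemmas -----

-- the accumulator shape of Source B's prefixMaxes loop
lemma pvPrefixMaxes_aux (xs : List Int) (acc : List Int) (m : Int) :
    (xs.foldl (fun st x => (st.1 ++ [st.2], max st.2 x)) (acc, m)).1
      = acc ++ (List.range xs.length).map (fun i => (xs.take i).foldl max m) := by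
  induction xs generalizing acc m with
  | nil => simp
  | cons x xs ih =>
    rw [List.foldl_cons, ih]
    rw [List.length_cons, List.range_succ_eq_map, List.map_cons, List.map_map]
    simp [Function.comp_def, List.append_assoc]

lemma pvPrefixMaxes_eq (xs : List Int) :
    pvPrefixMaxes xs = (List.range xs.length).map (fun i => (xs.take i).foldl max (-1)) := by
  rw [pvPrefixMaxes, pvPrefixMaxes_aux]
  simp

lemma pvPrefixMaxes_length (xs : List Int) : (pvPrefixMaxes xs).length = xs.length := by
  rw [pvPrefixMaxes_eq]; simp

lemma pvPrefixMaxes_getD (xs : List Int) (i : Nat) (hi : i < xs.length) :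
    (pvPrefixMaxes xs).getD i 0 = (xs.take i).foldl max (-1) := by
  rw [pvPrefixMaxes_eq,
    List.getD_eq_getElem _ _ (by simpa using hi), List.getElem_map, List.getElem_range]

lemma foldl_max_reverse (l : List Int) (m : Int) :
    l.reverse.foldl max m = l.foldl max m := by
  induction l generalizing m with
  | nil => rfl
  | cons x xs ih =>
    simp only [List.reverse_cons, List.foldl_append, List.foldl_cons, List.foldl_nil, ih]
    exact (foldl_max_comm xs m x).symm

-- entry b of prefixMaxes(xs[::-1])[::-1]: the maximum of xs beyond position b, base -1
lemma pvSuffixMaxes_getD (xs : List Int) (b : Nat) (hb : b < xs.length) :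
    ((pvPrefixMaxes xs.reverse).reverse).getD b 0 = (xs.drop (b + 1)).foldl max (-1) := by
  have hlen : (pvPrefixMaxes xs.reverse).length = xs.length := by
    rw [pvPrefixMaxes_length, List.length_reverse]
  have hb' : b < (pvPrefixMaxes xs.reverse).reverse.length := by simpa [hlen] using hb
  rw [List.getD_eq_getElem _ _ hb', List.getElem_reverse]
  have h1 : (pvPrefixMaxes xs.reverse).length - 1 - b < xs.reverse.length := by
    simp [hlen]; omega
  rw [← List.getD_eq_getElem _ _ (by simpa [hlen] using h1),
    pvPrefixMaxes_getD _ _ h1, hlen]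
  have htk : xs.reverse.take (xs.length - 1 - b) = (xs.drop (b + 1)).reverse := by
    rw [List.take_reverse]
    congr 2
    omega
  rw [htk, foldl_max_reverse]

-- all rows of a rectangular non-empty grid have the width min? returns
lemma foldl_min_const (l : List Nat) (v : Nat) (hv : ∀ y ∈ l, y = v) :
    l.foldl min v = v := by
  induction l with
  | nil => rfl
  | cons x xs ih =>
    rw [List.foldl_cons, hv x List.mem_cons_self, min_self]
    exact ih (fun y hy => hv y (List.mem_cons_of_mem _ hy))

lemma pvWidth_rect (grid : List (List Int)) (hne : grid ≠ [])
    (hpre : ∀ row ∈ grid, row.length = (grid.getD 0 []).length) :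
    ((grid.map List.length).min?).getD 0 = (grid.getD 0 []).length := by
  cases grid with
  | nil => exact absurd rfl hne
  | cons r rest =>
    rw [List.map_cons, List.min?_cons']
    simp only [Option.getD_some]
    have hr : r.length = ((r :: rest).getD 0 []).length := hpre r List.mem_cons_self
    rw [← hr] at *
    apply foldl_min_const
    intro y hy
    obtain ⟨row, hrow, rfl⟩ := List.mem_map.mp hy
    exact hpre row (List.mem_cons_of_mem _ hrow)

-- column b of zip(*grid), as a list indexed by rows
lemma pvCols_getD (grid : List (List Int)) (hne : grid ≠ [])
    (hpre : ∀ row ∈ grid, row.length = (grid.getD 0 []).length) (b : Nat)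
    (hb : b < (grid.getD 0 []).length) :
    (pvCols grid).getD b [] = grid.map (fun row => row.getD b 0) := by
  rw [pvCols]
  have hw := pvWidth_rect grid hne hpre
  have hb' : b < ((List.range (((grid.map List.length).min?).getD 0)).map
      (fun c => grid.map (fun row => row.getD c 0))).length := by
    simpa [hw] using hb
  rw [List.getD_eq_getElem _ _ hb', List.getElem_map, List.getElem_range]

lemma pvCols_length (grid : List (List Int)) (hne : grid ≠ [])
    (hpre : ∀ row ∈ grid, row.length = (grid.getD 0 []).length) :
    (pvCols grid).length = (grid.getD 0 []).length := by
  rw [pvCols, List.length_map, List.length_range, pvWidth_rect grid hne hpre]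

-- column b as the list of cell values
lemma pvCol_eq (grid : List (List Int)) (b : Nat) :
    grid.map (fun row => row.getD b 0)
      = (List.range grid.length).map (fun i => (grid.getD i []).getD b 0) := by
  apply List.ext_getElem (by simp)
  intro i h1 h2
  simp only [List.getElem_map, List.getElem_range]
  rw [List.getD_eq_getElem grid [] (by simpa using h1)]

-- B's cell value at (a, b), as the four directional conditions
lemma getB_cell (grid : List (List Int)) (hne : grid ≠ [])
    (hpre : ∀ row ∈ grid, row.length = (grid.getD 0 []).length) (a b : Nat)
    (ha : a < grid.length) (hb : b < (grid.getD 0 []).length)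
    (h1 : a < (getVisibilityGrid_alt grid).length)
    (h2 : b < (getVisibilityGrid_alt grid)[a].length) :
    (getVisibilityGrid_alt grid)[a][b]
      = decide ((pvCondL grid a b ∨ pvCondR grid (grid.getD 0 []).length a b) ∨
                (pvCondT grid a b ∨ pvCondB grid grid.length a b)) := by
  have hrow : (grid.getD a []).length = (grid.getD 0 []).length :=
    hpre _ (pvRow_mem grid a ha)
  simp only [getVisibilityGrid_alt, List.getElem_map, List.getElem_range]
  -- identify the four table entries
  have hbrow : b < (grid.getD a []).length := by rw [hrow]; exact hb
  have hL : ((grid.map pvPrefixMaxes).getD a []).getD b 0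
      = ((List.range b).map (pvCell grid a)).foldl max (-1) := by
    rw [List.getD_eq_getElem (grid.map pvPrefixMaxes) [] (by simpa using ha), List.getElem_map,
      ← List.getD_eq_getElem grid [] ha, pvPrefixMaxes_getD _ _ hbrow]
    rw [show (List.range b).map (pvCell grid a)
          = (List.range b).map (fun i => (grid.getD a []).getD i 0) from rfl,
      map_getD_range_eq_take _ _ (le_of_lt hbrow)]
  have hR : ((grid.map (fun row => (pvPrefixMaxes row.reverse).reverse)).getD a []).getD b 0
      = ((List.range' (b + 1) ((grid.getD 0 []).length - (b + 1))).map (pvCell grid a)).foldl max (-1) := by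
    rw [List.getD_eq_getElem (grid.map (fun row => (pvPrefixMaxes row.reverse).reverse)) [] (by simpa using ha), List.getElem_map,
      ← List.getD_eq_getElem grid [] ha, pvSuffixMaxes_getD _ _ hbrow]
    rw [show (List.range' (b + 1) ((grid.getD 0 []).length - (b + 1))).map (pvCell grid a)
          = (List.range' (b + 1) ((grid.getD 0 []).length - (b + 1))).map
              (fun i => (grid.getD a []).getD i 0) from rfl,
      ← hrow, map_getD_range'_eq_drop]
  have hcolb : (pvCols grid).getD b [] = grid.map (fun row => row.getD b 0) :=
    pvCols_getD grid hne hpre b hb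
  have hcollen : (grid.map (fun row => row.getD b 0)).length = grid.length := by simp
  have hblt : b < (pvCols grid).length := by rw [pvCols_length grid hne hpre]; exact hb
  have hT : (((pvCols grid).map pvPrefixMaxes).getD b []).getD a 0
      = ((List.range a).map (fun i => pvCell grid i b)).foldl max (-1) := by
    rw [List.getD_eq_getElem ((pvCols grid).map pvPrefixMaxes) [] (by simpa using hblt), List.getElem_map,
      ← List.getD_eq_getElem (pvCols grid) [] hblt, hcolb,
      pvPrefixMaxes_getD _ _ (by rw [hcollen]; exact ha), pvCol_eq]
    rw [← List.map_take, List.take_range, Nat.min_eq_left (le_of_lt ha)]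
    rfl
  have hB : (((pvCols grid).map (fun col => (pvPrefixMaxes col.reverse).reverse)).getD b []).getD a 0
      = ((List.range' (a + 1) (grid.length - (a + 1))).map (fun i => pvCell grid i b)).foldl max (-1) := by
    rw [List.getD_eq_getElem ((pvCols grid).map (fun col => (pvPrefixMaxes col.reverse).reverse)) [] (by simpa using hblt), List.getElem_map,
      ← List.getD_eq_getElem (pvCols grid) [] hblt, hcolb,
      pvSuffixMaxes_getD _ _ (by rw [hcollen]; exact ha), pvCol_eq]
    rw [← List.map_drop, range_drop]
    rfl
  rw [hL, hR, hT, hB, decide_eq_decide]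
  show (grid.getD a []).getD b 0 > _ ↔ _
  rw [gt_iff_lt, min_lt_iff, min_lt_iff, min_lt_iff]
  simp only [pvCondL, pvCondR, pvCondT, pvCondB, pvCell, gt_iff_lt]
  exact or_assoc

-- ===== VERDICT (by name: the statement is the Claim_ definition above) =====
theorem getVisibilityGrid_spec : Claim_equal_getVisibilityGrid := by
  intro grid _ hpre
  obtain ⟨hne, hrows⟩ := hpre
  show getVisibilityGrid grid = getVisibilityGrid_alt grid
  have hblen : (getVisibilityGrid_alt grid).length = grid.length := by
    simp [getVisibilityGrid_alt]
  apply List.ext_getElem (by rw [getA_length, hblen])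
  intro a h1 h2
  have ha : a < grid.length := by rwa [getA_length] at h1
  have hAl : (getVisibilityGrid grid)[a].length = (grid.getD a []).length := by
    rw [← List.getD_eq_getElem _ _ h1, getA_rowlen]
  have hBl : (getVisibilityGrid_alt grid)[a].length = (grid.getD a []).length := by
    simp [getVisibilityGrid_alt]
  apply List.ext_getElem (by rw [hAl, hBl])
  intro b hb1 hb2
  have hbc : b < (grid.getD a []).length := by rwa [hAl] at hb1
  have hbC : b < (grid.getD 0 []).length := by
    rwa [hrows _ (pvRow_mem grid a ha)] at hbc
  have hAcell : (getVisibilityGrid grid)[a][b] = pvGetV (getVisibilityGrid grid) a b := by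
    rw [pvGetV, List.getD_eq_getElem _ _ h1, List.getD_eq_getElem _ _ hb1]
  rw [hAcell, getA_getV grid hrows a b,
    getB_cell grid hne hrows a b ha hbC (by rwa [hblen]) hb2]
  rw [Bool.eq_iff_iff]
  simp only [Bool.or_eq_true, decide_eq_true_eq]
  constructor
  · rintro (⟨-, -, h⟩ | ⟨-, -, h⟩)
    · exact Or.inl h
    · exact Or.inr h
  · rintro (h | h)
    · exact Or.inl ⟨ha, hbC, h⟩
    · exact Or.inr ⟨hbC, ha, h⟩
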